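-- pv_equiv track=rewrite | github.com/CarolinaArdana/Bla | Ana/LimiteParcial.py | NPicos
-- ===== SOURCE A (Python) =====
-- def NPicos(limite, vetor):
--     qt=0
--     aux = 0
--     aux2 = 0
--     for i in vetor:
--         if i > limite:
--             aux += 1
--             aux2 = 1
--         elif aux2 == 1 and aux > 0:
--             qt+=1
--             aux2 = 0
--     return qt
-- ===== SOURCE B (Python) =====
-- def NPicos(limite, vetor):
--     above = [x > limite for x in vetor]
--     return sum(1 for a, b in zip(above, above[1:]) if a and not b)
-- ===== Notes on version B (the rewrite author's own statement) =====
-- stated objective: simpler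
-- what changed: Replaces the three-counter flag state machine with a boolean mask and a count of falling edges over adjacent mask pairs (the aux counter and aux>0 guard disappear).
import Mathlib
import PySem

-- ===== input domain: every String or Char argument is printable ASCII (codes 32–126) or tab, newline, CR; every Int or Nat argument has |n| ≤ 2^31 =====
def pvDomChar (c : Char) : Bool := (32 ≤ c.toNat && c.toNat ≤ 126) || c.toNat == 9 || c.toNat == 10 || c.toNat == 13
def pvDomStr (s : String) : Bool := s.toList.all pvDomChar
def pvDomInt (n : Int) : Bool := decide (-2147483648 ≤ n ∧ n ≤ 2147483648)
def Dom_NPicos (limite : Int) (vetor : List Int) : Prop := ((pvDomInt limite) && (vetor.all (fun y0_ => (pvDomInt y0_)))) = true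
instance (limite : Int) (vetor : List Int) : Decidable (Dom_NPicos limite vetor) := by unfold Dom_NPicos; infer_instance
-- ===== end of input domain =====

-- B replaces A's three-counter flag state machine with a boolean mask and a count of
-- falling edges over adjacent mask pairs (objective: simpler).

-- ===== PORT A =====
def NPicos (limite : Int) (vetor : List Int) : Int :=
  (vetor.foldl (fun (s : Int × Int × Int) i =>
      if i > limite then (s.1, s.2.1 + 1, 1)
      else if s.2.2 = 1 ∧ s.2.1 > 0 then (s.1 + 1, s.2.1, 0)
      else s) (0, 0, 0)).1

-- ===== PORT B =====
def NPicos_alt (limite : Int) (vetor : List Int) : Int :=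
  let above := vetor.map (fun x => decide (x > limite))
  (above.zip above.tail).foldl (fun acc p => if p.1 && !p.2 then acc + 1 else acc) 0

-- ===== PRECONDITION & SPEC =====
def Spec_NPicos (limite : Int) (vetor : List Int) (out : Int) : Prop := out = NPicos_alt limite vetor
instance (limite : Int) (vetor : List Int) (out : Int) : Decidable (Spec_NPicos limite vetor out) := by unfold Spec_NPicos; infer_instance

-- ===== CLAIM (what is proved, stated in full; the proofs are below) =====
def Claim_equal_NPicos : Prop := ∀ (limite : Int) (vetor : List Int), Dom_NPicos limite vetor → Spec_NPicos limite vetor (NPicos limite vetor)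

-- ===== LEMMAS AND PROOFS =====

-- Abbreviation for A's step function.
def pvStepA (limite : Int) (s : Int × Int × Int) (i : Int) : Int × Int × Int :=
  if i > limite then (s.1, s.2.1 + 1, 1)
  else if s.2.2 = 1 ∧ s.2.1 > 0 then (s.1 + 1, s.2.1, 0)
  else s

-- Falling-edge count of a list given the "currently above" flag for the previous element.
def pvE (limite : Int) (b : Bool) : List Int → Int
  | [] => 0
  | x :: xs => (if b ∧ ¬ (x > limite) then 1 else 0) + pvE limite (decide (x > limite)) xs

-- Recursive characterisation of B's adjacent-pair count.
def pvZ (limite : Int) : List Int → Int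
  | [] => 0
  | [_] => 0
  | x :: y :: r => (if x > limite ∧ ¬ (y > limite) then 1 else 0) + pvZ limite (y :: r)

lemma pvZ_cons (limite x : Int) (xs : List Int) :
    pvZ limite (x :: xs) =
      (if x > limite ∧ xs ≠ [] ∧ ¬ (xs.headI > limite) then 1 else 0) + pvZ limite xs := by
  cases xs <;> simp [pvZ, List.headI]

lemma pvE_eq_pvZ (limite : Int) (b : Bool) (l : List Int) :
    pvE limite b l =
      (if b ∧ l ≠ [] ∧ ¬ (l.headI > limite) then 1 else 0) + pvZ limite l := by
  induction l generalizing b with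
  | nil => simp [pvE, pvZ]
  | cons x xs ih =>
    rw [pvE, ih, pvZ_cons]
    cases b <;> by_cases hx : x > limite <;> simp [hx, List.headI]

-- Fold invariant for A: both flag shapes, proved simultaneously.
lemma pvFoldA_inv (limite : Int) (l : List Int) :
    (∀ qt aux : Int, 0 ≤ aux →
        (l.foldl (pvStepA limite) (qt, aux, 0)).1 = qt + pvE limite false l) ∧
    (∀ qt aux : Int, 0 < aux →
        (l.foldl (pvStepA limite) (qt, aux, 1)).1 = qt + pvE limite true l) := by
  induction l with
  | nil => simp [pvE]
  | cons x xs ih =>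
    constructor
    · intro qt aux haux
      by_cases hx : x > limite
      · simp only [List.foldl_cons, pvStepA]
        rw [if_pos hx, ih.2 qt (aux + 1) (by omega)]
        simp [pvE, hx]
      · simp only [List.foldl_cons, pvStepA]
        rw [if_neg hx, if_neg (by simp), ih.1 qt aux haux]
        simp [pvE, hx]
    · intro qt aux haux
      by_cases hx : x > limite
      · simp only [List.foldl_cons, pvStepA]
        rw [if_pos hx, ih.2 qt (aux + 1) (by omega)]
        simp [pvE, hx]
      · simp only [List.foldl_cons, pvStepA]
        rw [if_neg hx, if_pos (⟨trivial, haux⟩ : True ∧ aux > 0),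
          ih.1 (qt + 1) aux (le_of_lt haux)]
        simp [pvE, hx]
        ring

-- B's fold equals acc + pvZ.
lemma pvFoldB (limite : Int) (l : List Int) (acc : Int) :
    ((l.map (fun x => decide (x > limite))).zip
        (l.map (fun x => decide (x > limite))).tail).foldl
      (fun acc p => if p.1 && !p.2 then acc + 1 else acc) acc = acc + pvZ limite l := by
  induction l generalizing acc with
  | nil => simp [pvZ]
  | cons x xs ih =>
    cases xs with
    | nil => simp [pvZ]
    | cons y r =>
      simp only [List.map_cons, List.tail_cons] at ih ⊢
      simp only [List.zip_cons_cons, List.foldl_cons]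
      rw [ih]
      by_cases hx : x > limite <;> by_cases hy : y > limite <;>
        simp [pvZ, hx, hy] <;> ring

-- ===== VERDICT (by name: the statement is the Claim_ definition above) =====
theorem NPicos_spec : Claim_equal_NPicos := by
  intro limite vetor _
  unfold Spec_NPicos
  have hA : (vetor.foldl (pvStepA limite) ((0 : Int), (0 : Int), (0 : Int))).1
      = 0 + pvE limite false vetor := (pvFoldA_inv limite vetor).1 0 0 le_rfl
  show (vetor.foldl (pvStepA limite) ((0 : Int), (0 : Int), (0 : Int))).1
      = ((vetor.map (fun x => decide (x > limite))).zip
          (vetor.map (fun x => decide (x > limite))).tail).foldl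
        (fun acc p => if p.1 && !p.2 then acc + 1 else acc) 0
  rw [hA, pvFoldB, pvE_eq_pvZ]
  simp
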